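-- pv_equiv track=rewrite | github.com/CiscoDevNet/sastre | cisco_sdwan/base/catalog.py | ordered_tags
-- ===== SOURCE A (Python) =====
-- from typing import NamedTuple, Union, Optional, Iterator
--
-- CATALOG_TAG_ALL = 'all'
--
-- _tag_dependency_list = [
--     'template_device',
--     'template_feature',
--     'policy_vsmart',
--     'policy_vedge',
--     'policy_security',
--     'policy_voice',
--     'policy_customapp',
--     'policy_definition',
--     'policy_profile',
--     'policy_list',
-- ]
--
-- def ordered_tags(tag: str, single: bool = False, reverse: bool = False) -> Iterator[str]:
--     """
--     Generator which yields the specified tag plus any 'child' tags (i.e. dependent tags), following the order in which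
--     items need to be removed based on their dependencies (e.g. template_device before template_feature). The overall
--     order is defined by _tag_dependency_list.
--     If special tag 'all' is used, all items from _tag_dependency_list are yielded.
--     :param tag: tag string or 'all'
--     :param single: Optional, when True only a the one (first) tag is yielded. Used mainly for convenience of the caller.
--     :param reverse: If true, yield tags in reverse order
--     :return: Selected tags in order, as per _tag_dependency_list
--     """
--     find_tag = (tag == CATALOG_TAG_ALL)
--     for item in _tag_dependency_list if not reverse else reversed(_tag_dependency_list):
--         if not find_tag:
--             if item == tag:
--                 find_tag = True
--             else:
--                 continue
--         yield item
--
--         if single: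
--             break
-- ===== SOURCE B (Python) =====
-- CATALOG_TAG_ALL = 'all'
--
-- _tag_dependency_list = [
--     'template_device',
--     'template_feature',
--     'policy_vsmart',
--     'policy_vedge',
--     'policy_security',
--     'policy_voice',
--     'policy_customapp',
--     'policy_definition',
--     'policy_profile',
--     'policy_list',
-- ]
--
-- def ordered_tags(tag, single=False, reverse=False):
--     seq = _tag_dependency_list[::-1] if reverse else _tag_dependency_list
--     if tag == CATALOG_TAG_ALL:
--         start = 0
--     else:
--         try:
--             start = seq.index(tag)
--         except ValueError:
--             return
--     sub = seq[start:]
--     if single: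
--         sub = sub[:1]
--     yield from sub
-- ===== Notes on version B (the rewrite author's own statement) =====
-- stated objective: simpler
-- what changed: B replaces A's stateful skip-until-found generator loop (find_tag flag, continue, break) with a single index lookup and slicing: locate the tag once, take the suffix, truncate to one element when single.
import Mathlib
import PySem

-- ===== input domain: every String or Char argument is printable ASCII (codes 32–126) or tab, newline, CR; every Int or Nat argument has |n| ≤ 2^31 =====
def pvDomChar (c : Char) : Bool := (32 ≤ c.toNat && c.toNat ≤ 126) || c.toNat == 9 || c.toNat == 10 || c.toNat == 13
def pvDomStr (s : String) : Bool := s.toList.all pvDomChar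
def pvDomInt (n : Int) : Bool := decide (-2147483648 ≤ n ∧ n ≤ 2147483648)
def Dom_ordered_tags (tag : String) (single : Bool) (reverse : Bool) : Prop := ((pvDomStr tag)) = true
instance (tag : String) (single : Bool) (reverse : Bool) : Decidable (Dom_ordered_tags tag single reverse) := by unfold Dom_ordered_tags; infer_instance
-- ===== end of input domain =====

-- B replaces A's stateful skip-until-found loop (find_tag flag / continue / break) with one
-- index lookup plus slicing; objective: simpler (same O(n) cost).
-- Both programs are generators; equivalence is about the list of yielded items.

def pvTagDependencyList : List String :=
  ["template_device", "template_feature", "policy_vsmart", "policy_vedge",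
   "policy_security", "policy_voice", "policy_customapp", "policy_definition",
   "policy_profile", "policy_list"]

-- ===== PORT A =====
-- the for-loop: state find_tag; 'continue' while not found; yield; 'break' when single
def pvLoopA (tag : String) (single : Bool) : Bool → List String → List String
  | _, [] => []
  | findTag, item :: rest =>
    if !findTag then
      if item == tag then
        -- find_tag = True, then yield item; break if single
        if single then [item] else item :: pvLoopA tag single true rest
      else
        pvLoopA tag single false rest
    else
      if single then [item] else item :: pvLoopA tag single true rest

def ordered_tags (tag : String) (single : Bool) (reverse : Bool) : List String :=
  let find_tag := tag == "all"
  pvLoopA tag single find_tag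
    (if !reverse then pvTagDependencyList else pvTagDependencyList.reverse)

-- ===== PORT B =====
def ordered_tags_alt (tag : String) (single : Bool) (reverse : Bool) : List String :=
  let seq := if reverse then (PySem.List.slice? pvTagDependencyList none none (-1)).getD [] else pvTagDependencyList
  let start? : Option Nat :=
    if tag == "all" then some 0 else PySem.List.index? seq tag
  match start? with
  | none => []
  | some start =>
    let sub := PySem.List.slice seq (some (start : Int)) none
    if single then PySem.List.slice sub none (some 1) else sub

-- ===== PRECONDITION & SPEC =====
def Spec_ordered_tags (tag : String) (single : Bool) (reverse : Bool) (out : List String) : Prop := out = ordered_tags_alt tag single reverse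
instance (tag : String) (single : Bool) (reverse : Bool) (out : List String) : Decidable (Spec_ordered_tags tag single reverse out) := by unfold Spec_ordered_tags; infer_instance

-- ===== CLAIM (what is proved, stated in full; the proofs are below) =====
def Claim_equal_ordered_tags : Prop := ∀ (tag : String) (single : Bool) (reverse : Bool), Dom_ordered_tags tag single reverse → Spec_ordered_tags tag single reverse (ordered_tags tag single reverse)

-- ===== LEMMAS AND PROOFS =====

-- once find_tag is true the loop yields everything (or the head alone when single)
theorem pvLoopA_true (tag : String) (single : Bool) (l : List String) :
    pvLoopA tag single true l = if single then l.take 1 else l := by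
  induction l with
  | nil => cases single <;> simp [pvLoopA]
  | cons x xs ih => cases single <;> simp [pvLoopA, ih]

-- while find_tag is false the loop skips until the first occurrence of tag
theorem pvLoopA_false (tag : String) (single : Bool) (l : List String) :
    pvLoopA tag single false l =
      match PySem.List.index? l tag with
      | none => []
      | some i => if single then (l.drop i).take 1 else l.drop i := by
  induction l with
  | nil => simp [pvLoopA, PySem.List.index?_eq_idxOf?, List.idxOf?]
  | cons x xs ih =>
    by_cases hx : x = tag
    · subst hx
      rw [PySem.List.index?_cons_self]
      cases single <;> simp [pvLoopA, pvLoopA_true]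
    · have : (x == tag) = false := by simpa using hx
      rw [PySem.List.index?_cons_of_ne xs hx]
      simp only [pvLoopA, this, Bool.not_false, if_true]
      rw [ih]
      cases h : PySem.List.index? xs tag with
      | none => simp
      | some i => simp

-- pvLoopA_false restated with the slice expressions B's port uses
theorem pvLoopA_false' (tag : String) (single : Bool) (l : List String) :
    pvLoopA tag single false l =
      match PySem.List.index? l tag with
      | none => []
      | some i =>
        if single then PySem.List.slice (PySem.List.slice l (some (i : Int)) none) none (some 1)
        else PySem.List.slice l (some (i : Int)) none := by
  rw [pvLoopA_false]
  cases h : PySem.List.index? l tag with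
  | none => simp
  | some i => cases single <;> simp [PySem.List.slice_from_natCast, PySem.List.slice_to]

-- ===== VERDICT (by name: the statement is the Claim_ definition above) =====
theorem ordered_tags_spec : Claim_equal_ordered_tags := by
  intro tag single reverse _
  show ordered_tags tag single reverse = ordered_tags_alt tag single reverse
  unfold ordered_tags ordered_tags_alt
  have hrev : (PySem.List.slice? pvTagDependencyList none none (-1)).getD [] = pvTagDependencyList.reverse := by
    rw [PySem.List.slice?_none_none_neg_one]; rfl
  by_cases hall : tag = "all"
  · subst hall
    cases reverse <;> cases single <;> decide
  · have hne : (tag == "all") = false := by simpa using hall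
    cases reverse <;>
      simp only [hrev, Bool.not_false, Bool.not_true, if_true, Bool.false_eq_true,
        if_false, hne, pvLoopA_false']
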